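-- pv_equiv track=rewrite | github.com/niallbuckley/Puzzles | aoc/day_9.py | next_val
-- ===== SOURCE A (Python) =====
-- dic = {}
--
-- def next_val(seq):
--     def recursion(i, line, new_line, layer):
--         if sum(line) == 0:
--             return layer
--
--         dic[layer] = line[-1]
--         for i in range(len(line)-1):
--             new_line.append(line[i+1] - line[i])
--
--         return recursion(0, new_line, [], layer + 1)
--
--
--
--     return recursion(0,seq, [], 0)
-- ===== SOURCE B (Python) =====
-- dic = {}
--
-- def next_val(seq):
--     layer = 0
--     line = seq
--     while sum(line) != 0:
--         dic[layer] = line[-1]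
--         line = [b - a for a, b in zip(line, line[1:])]
--         layer += 1
--     return layer
-- ===== Notes on version B (the rewrite author's own statement) =====
-- stated objective: idiomatic
-- what changed: Replaces the inner-function recursion with unused parameters and an index-based append loop by a flat while loop that builds each difference layer with a zip comprehension.
import Mathlib
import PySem

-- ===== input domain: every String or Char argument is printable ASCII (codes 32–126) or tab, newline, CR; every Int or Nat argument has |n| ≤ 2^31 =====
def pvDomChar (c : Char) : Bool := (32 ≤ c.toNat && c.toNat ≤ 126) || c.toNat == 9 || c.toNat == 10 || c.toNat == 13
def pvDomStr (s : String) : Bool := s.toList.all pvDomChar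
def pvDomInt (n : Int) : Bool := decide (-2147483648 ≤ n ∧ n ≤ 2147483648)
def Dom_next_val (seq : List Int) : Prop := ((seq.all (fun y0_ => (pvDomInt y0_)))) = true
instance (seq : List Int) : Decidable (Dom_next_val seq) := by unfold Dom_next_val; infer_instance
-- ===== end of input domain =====

-- B rewrites A's recursion as an iterative while loop over difference layers (idiomatic);
-- equivalence is about the RETURN value only: both Pythons also write the same dic[layer]=line[-1]
-- entries into a module-level dict, a side effect not modelled here.

-- ===== PORT A =====
-- the for-loop 'for i in range(len(line)-1): new_line.append(line[i+1]-line[i])'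
def pvDiffsA (line : List Int) (new_line : List Int) : List Int :=
  (PySem.List.pyRange 0 ((line.length : Int) - 1) 1).foldl
    (fun acc i => acc ++ [PySem.List.pyGetD line (i + 1) 0 - PySem.List.pyGetD line i 0]) new_line

-- 'recursion(i, line, new_line, layer)'; the fuel argument only makes the recursion total in Lean:
-- each step shrinks line by one and sum [] = 0, so depth ≤ seq.length and fuel len+1 is never exhausted.
def nextValRec : Nat → Int → List Int → List Int → Int → Int
  | 0, _, _, _, layer => layer
  | n + 1, _i, line, new_line, layer =>
    if line.sum = 0 then layer
    else nextValRec n 0 (pvDiffsA line new_line) [] (layer + 1)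

def next_val (seq : List Int) : Int := nextValRec (seq.length + 1) 0 seq [] 0

-- ===== PORT B =====
-- the while loop of Source B; same fuel guard for totality (loop runs at most seq.length times)
def nextValLoop : Nat → List Int → Int → Int
  | 0, _, layer => layer
  | n + 1, line, layer =>
    if line.sum ≠ 0 then
      nextValLoop n (List.zipWith (fun a b => b - a) line line.tail) (layer + 1)
    else layer

def next_val_alt (seq : List Int) : Int := nextValLoop (seq.length + 1) seq 0

-- ===== PRECONDITION & SPEC =====
def Spec_next_val (seq : List Int) (out : Int) : Prop := out = next_val_alt seq
instance (seq : List Int) (out : Int) : Decidable (Spec_next_val seq out) := by unfold Spec_next_val; infer_instance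

-- ===== CLAIM (what is proved, stated in full; the proofs are below) =====
def Claim_equal_next_val : Prop := ∀ (seq : List Int), Dom_next_val seq → Spec_next_val seq (next_val seq)

-- ===== LEMMAS AND PROOFS =====

-- A's append loop builds exactly the zip-comprehension layer of B.
theorem pvDiffsA_eq (line : List Int) :
    pvDiffsA line [] = List.zipWith (fun a b => b - a) line line.tail := by
  unfold pvDiffsA
  rw [PySem.List.foldl_append_singleton_eq_map]
  simp only [List.nil_append]
  apply List.ext_getElem
  · simp [PySem.List.length_pyRange_one, List.length_zipWith, List.length_tail]
  · intro k hk1 hk2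
    have hlen : k < line.length - 1 := by
      simpa [PySem.List.length_pyRange_one] using hk1
    have h1 : k + 1 < line.length := by omega
    have h0 : k < line.length := by omega
    have htail : k < line.tail.length := by simp [List.length_tail]; omega
    simp only [List.getElem_map, PySem.List.getElem_pyRange_one, zero_add]
    have e1 : PySem.List.pyGetD line ((k : Int) + 1) 0 = line.getD (k + 1) 0 := by
      have hc : ((k : Int) + 1) = ((k + 1 : Nat) : Int) := by push_cast; ring
      rw [hc, PySem.List.pyGetD_natCast]
    have e0 : PySem.List.pyGetD line (k : Int) 0 = line.getD k 0 :=
      PySem.List.pyGetD_natCast line k 0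
    rw [e1, e0, List.getElem_zipWith,
        List.getD_eq_getElem line 0 h1, List.getD_eq_getElem line 0 h0]
    simp [List.getElem_tail]

theorem nextValRec_eq_loop (n : Nat) :
    ∀ (i : Int) (line : List Int) (layer : Int),
      nextValRec n i line [] layer = nextValLoop n line layer := by
  induction n with
  | zero => intro i line layer; rfl
  | succ m ih =>
    intro i line layer
    simp only [nextValRec, nextValLoop]
    by_cases h : line.sum = 0
    · simp [h]
    · simp only [h, if_false, ne_eq, not_false_eq_true, if_true]
      rw [pvDiffsA_eq, ih]

-- ===== VERDICT (by name: the statement is the Claim_ definition above) =====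
theorem next_val_spec : Claim_equal_next_val := by
  intro seq _
  unfold Spec_next_val next_val next_val_alt
  exact nextValRec_eq_loop _ _ _ _
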